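-- pv_equiv track=rewrite | github.com/DarthBanana/AdventOfCode | 2018/02/solution.py | part1
-- ===== SOURCE A (Python) =====
-- def part1(data):
--     twos = 0
--     threes = 0
--     for word in data:
--         map = {}
--         for c in word:
--             map[c] = map.get(c, 0) + 1
--         if 2 in map.values():
--             twos += 1
--         if 3 in map.values():
--             threes += 1
--
--
--     return twos * threes
-- ===== SOURCE B (Python) =====
-- def part1(data):
--     twos = 0
--     threes = 0
--     for word in data:
--         lens = set()
--         n = 0
--         prev = None
--         for c in sorted(word):
--             if c == prev:
--                 n += 1
--             else:
--                 if n: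
--                     lens.add(n)
--                 n = 1
--                 prev = c
--         if n:
--             lens.add(n)
--         if 2 in lens:
--             twos += 1
--         if 3 in lens:
--             threes += 1
--     return twos * threes
-- ===== Notes on version B (the rewrite author's own statement) =====
-- stated objective: alternative
-- what changed: Per-word letter frequencies are obtained by sorting the word and scanning runs of equal characters (collecting run lengths into a set) instead of building a per-character frequency dict and testing its values.
import Mathlib
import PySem

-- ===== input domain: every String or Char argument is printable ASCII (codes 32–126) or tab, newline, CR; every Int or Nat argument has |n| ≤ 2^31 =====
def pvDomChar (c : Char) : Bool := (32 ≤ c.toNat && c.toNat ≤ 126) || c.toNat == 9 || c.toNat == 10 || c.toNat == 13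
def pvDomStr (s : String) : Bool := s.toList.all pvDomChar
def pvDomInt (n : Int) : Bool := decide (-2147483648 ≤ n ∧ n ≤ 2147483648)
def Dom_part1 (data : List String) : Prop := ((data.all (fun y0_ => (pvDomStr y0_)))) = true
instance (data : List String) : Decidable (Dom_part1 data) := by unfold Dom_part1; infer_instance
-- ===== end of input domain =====

-- B counts per-word letter frequencies by sorting the word and scanning runs of equal
-- characters instead of building a frequency dict (objective: alternative algorithm).

-- ===== PORT A =====
def part1 (data : List String) : Int :=
  let st := data.foldl (fun (acc : Int × Int) word =>
    let m := word.toList.foldl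
      (fun (d : PySem.Dict Char Int) c => d.insert c (d.getD c 0 + 1)) PySem.Dict.empty
    let twos := if m.values.contains 2 then acc.1 + 1 else acc.1
    let threes := if m.values.contains 3 then acc.2 + 1 else acc.2
    (twos, threes)) (0, 0)
  st.1 * st.2

-- ===== PORT B =====
def part1_alt (data : List String) : Int :=
  let st := data.foldl (fun (acc : Int × Int) word =>
    let st2 := (PySem.List.sorted word.toList (fun x => x) false).foldl
      (fun (st : PySem.Set Int × Int × Option Char) c =>
        if some c == st.2.2 then (st.1, st.2.1 + 1, st.2.2)
        else ((if st.2.1 ≠ 0 then PySem.Set.add st.1 st.2.1 else st.1), 1, some c))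
      (PySem.Set.empty, 0, none)
    let lens := if st2.2.1 ≠ 0 then PySem.Set.add st2.1 st2.2.1 else st2.1
    let twos := if lens.contains 2 then acc.1 + 1 else acc.1
    let threes := if lens.contains 3 then acc.2 + 1 else acc.2
    (twos, threes)) (0, 0)
  st.1 * st.2

-- ===== PRECONDITION & SPEC =====
def Spec_part1 (data : List String) (out : Int) : Prop := out = part1_alt data
instance (data : List String) (out : Int) : Decidable (Spec_part1 data out) := by unfold Spec_part1; infer_instance

-- ===== CLAIM (what is proved, stated in full; the proofs are below) =====
def Claim_equal_part1 : Prop := ∀ (data : List String), Dom_part1 data → Spec_part1 data (part1 data)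

-- ===== LEMMAS AND PROOFS =====

-- B's inner-loop step function and final flush (identical to the code in part1_alt).
def pvRunStep (st : PySem.Set Int × Int × Option Char) (c : Char) :
    PySem.Set Int × Int × Option Char :=
  if some c == st.2.2 then (st.1, st.2.1 + 1, st.2.2)
  else ((if st.2.1 ≠ 0 then PySem.Set.add st.1 st.2.1 else st.1), 1, some c)

lemma pvRunStep_eq : pvRunStep = fun (st : PySem.Set Int × Int × Option Char) c =>
    if some c == st.2.2 then (st.1, st.2.1 + 1, st.2.2)
    else ((if st.2.1 ≠ 0 then PySem.Set.add st.1 st.2.1 else st.1), 1, some c) := rfl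

def pvFinish (st : PySem.Set Int × Int × Option Char) : PySem.Set Int :=
  if st.2.1 ≠ 0 then PySem.Set.add st.1 st.2.1 else st.1

-- Invariant of B's run scan over a sorted tail, with an open run (length n > 0) of a.
lemma pvRuns_aux (v : Int) (s : List Char) :
    ∀ (lens : PySem.Set Int) (n : Int) (a : Char),
      (a :: s).Pairwise (· ≤ ·) → 0 < n →
      (v ∈ pvFinish (s.foldl pvRunStep (lens, n, some a))
       ↔ v ∈ lens ∨ v = n + (s.count a : Int) ∨ ∃ c ∈ s, c ≠ a ∧ (s.count c : Int) = v) := by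
  induction s with
  | nil =>
    intro lens n a _ hn
    simp [pvFinish, PySem.Set.mem_add, hn.ne']
  | cons c t ih =>
    intro lens n a hsort hn
    have hac : a ≤ c := (List.pairwise_cons.1 hsort).1 c (by simp)
    have hsort' : (c :: t).Pairwise (· ≤ ·) := (List.pairwise_cons.1 hsort).2
    by_cases hca : c = a
    · subst hca
      have key := ih lens (n + 1) c hsort' (by omega)
      have hstep : pvRunStep (lens, n, some c) c = (lens, n + 1, some c) := by
        simp [pvRunStep]
      rw [List.foldl_cons, hstep, key]
      constructor
      · rintro (h | h | ⟨d, hd, hdc, hcnt⟩)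
        · exact Or.inl h
        · refine Or.inr (Or.inl ?_)
          rw [List.count_cons_self]; push_cast; omega
        · refine Or.inr (Or.inr ⟨d, List.mem_cons_of_mem c hd, hdc, ?_⟩)
          rwa [List.count_cons_of_ne (Ne.symm hdc)]
      · rintro (h | h | ⟨d, hd, hdc, hcnt⟩)
        · exact Or.inl h
        · refine Or.inr (Or.inl ?_)
          rw [List.count_cons_self] at h; push_cast at h ⊢; omega
        · rcases List.mem_cons.1 hd with hd | hd
          · exact absurd hd hdc
          · refine Or.inr (Or.inr ⟨d, hd, hdc, ?_⟩)
            rwa [List.count_cons_of_ne (Ne.symm hdc)] at hcnt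
    · -- a new run starts: c ≠ a, and a cannot occur again (the list is sorted)
      have hanot : a ∉ t := by
        intro hat
        exact hca (le_antisymm ((List.pairwise_cons.1 hsort').1 a hat) hac)
      have hbeq : (some c == some a) = false := by simp [hca]
      have hstep : pvRunStep (lens, n, some a) c = (PySem.Set.add lens n, 1, some c) := by
        simp [pvRunStep, hbeq, hn.ne']
      have key := ih (PySem.Set.add lens n) 1 c hsort' (by omega)
      rw [List.foldl_cons, hstep, key]
      have hcnt_a : (c :: t).count a = 0 := by
        rw [List.count_cons_of_ne hca]
        exact List.count_eq_zero.2 hanot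
      constructor
      · rintro (h | h | ⟨d, hd, hdc, hcnt⟩)
        · rcases (PySem.Set.mem_add lens n v).1 h with h | h
          · exact Or.inl h
          · refine Or.inr (Or.inl ?_); rw [hcnt_a]; push_cast; omega
        · refine Or.inr (Or.inr ⟨c, List.mem_cons_self, hca, ?_⟩)
          rw [List.count_cons_self]; push_cast at h ⊢; omega
        · have hda : d ≠ a := fun e => hanot (e ▸ hd)
          refine Or.inr (Or.inr ⟨d, List.mem_cons_of_mem c hd, hda, ?_⟩)
          rwa [List.count_cons_of_ne (Ne.symm hdc)]
      · rintro (h | h | ⟨d, hd, hda, hcnt⟩)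
        · exact Or.inl ((PySem.Set.mem_add lens n v).2 (Or.inl h))
        · rw [hcnt_a] at h
          exact Or.inl ((PySem.Set.mem_add lens n v).2 (Or.inr (by push_cast at h; omega)))
        · rcases List.mem_cons.1 hd with hd | hd
          · subst hd
            refine Or.inr (Or.inl ?_)
            rw [List.count_cons_self] at hcnt; push_cast at hcnt ⊢; omega
          · by_cases hdc : d = c
            · subst hdc
              refine Or.inr (Or.inl ?_)
              rw [List.count_cons_self] at hcnt; push_cast at hcnt ⊢; omega
            · refine Or.inr (Or.inr ⟨d, hd, hdc, ?_⟩)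
              rwa [List.count_cons_of_ne (Ne.symm hdc)] at hcnt

-- B's run-length set of a word: v is a run length iff v is the frequency of some letter.
lemma pvRuns_mem (v : Int) (w : List Char) :
    v ∈ pvFinish ((PySem.List.sorted w (fun x => x) false).foldl pvRunStep
        (PySem.Set.empty, 0, none))
    ↔ ∃ c ∈ w, (w.count c : Int) = v := by
  have hperm : (PySem.List.sorted w (fun x => x) false).Perm w :=
    PySem.List.sorted_perm w (fun x => x) false
  have hsort : (PySem.List.sorted w (fun x => x) false).Pairwise (· ≤ ·) :=
    PySem.List.sorted_pairwise w (fun x => x)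
  have hexch : (∃ c ∈ PySem.List.sorted w (fun x => x) false,
      ((PySem.List.sorted w (fun x => x) false).count c : Int) = v) ↔
      ∃ c ∈ w, (w.count c : Int) = v := by
    constructor
    · rintro ⟨c, hc, hv⟩
      exact ⟨c, hperm.mem_iff.1 hc, by rw [← hperm.count_eq]; exact hv⟩
    · rintro ⟨c, hc, hv⟩
      exact ⟨c, hperm.mem_iff.2 hc, by rw [hperm.count_eq]; exact hv⟩
  rw [← hexch]
  cases hs : PySem.List.sorted w (fun x => x) false with
  | nil => simp [pvFinish, PySem.Set.empty]
  | cons c t =>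
    rw [hs] at hsort
    have hstep : pvRunStep (PySem.Set.empty, 0, none) c = (PySem.Set.empty, 1, some c) := by
      simp [pvRunStep, PySem.Set.empty]
    rw [List.foldl_cons, hstep, pvRuns_aux v t PySem.Set.empty 1 c hsort (by omega)]
    simp only [PySem.Set.empty]
    constructor
    · rintro (h | h | ⟨d, hd, hdc, hcnt⟩)
      · simp at h
      · refine ⟨c, List.mem_cons_self, ?_⟩
        rw [List.count_cons_self]; push_cast at h ⊢; omega
      · refine ⟨d, List.mem_cons_of_mem c hd, ?_⟩
        rwa [List.count_cons_of_ne (Ne.symm hdc)]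
    · rintro ⟨d, hd, hcnt⟩
      rcases List.mem_cons.1 hd with hd | hd
      · subst hd
        refine Or.inr (Or.inl ?_)
        rw [List.count_cons_self] at hcnt; push_cast at hcnt ⊢; omega
      · by_cases hdc : d = c
        · subst hdc
          refine Or.inr (Or.inl ?_)
          rw [List.count_cons_self] at hcnt; push_cast at hcnt ⊢; omega
        · refine Or.inr (Or.inr ⟨d, hd, hdc, ?_⟩)
          rwa [List.count_cons_of_ne (Ne.symm hdc)] at hcnt

-- A's counter values: v is among the dict values iff v is the frequency of some letter.
lemma pvCounter_mem (v : Int) (w : List Char) :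
    v ∈ (w.foldl (fun (d : PySem.Dict Char Int) c => d.insert c (d.getD c 0 + 1))
        PySem.Dict.empty).values
    ↔ ∃ c ∈ w, (w.count c : Int) = v := by
  rw [PySem.Dict.foldl_insert_getD_add_one_eq_counter]
  simp [PySem.Dict.values, PySem.Dict.items_counter, PySem.Set.mem_ofList, eq_comm]

-- Per word, A's membership test over dict values equals B's over the run-length set.
lemma pvPerWord (v : Int) (word : String) :
    ((word.toList.foldl (fun (d : PySem.Dict Char Int) c => d.insert c (d.getD c 0 + 1))
        PySem.Dict.empty).values.contains v)
    = ((pvFinish ((PySem.List.sorted word.toList (fun x => x) false).foldl pvRunStep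
        (PySem.Set.empty, 0, none))).contains v) := by
  rw [Bool.eq_iff_iff]
  simp only [PySem.Set.contains, List.contains_iff_mem]
  rw [pvCounter_mem, pvRuns_mem]

-- ===== VERDICT (by name: the statement is the Claim_ definition above) =====
theorem part1_spec : Claim_equal_part1 := by
  intro data _
  show part1 data = part1_alt data
  have hstep : ∀ (acc : Int × Int), ∀ word ∈ data,
      (let m := word.toList.foldl
         (fun (d : PySem.Dict Char Int) c => d.insert c (d.getD c 0 + 1)) PySem.Dict.empty
       let twos := if m.values.contains 2 then acc.1 + 1 else acc.1
       let threes := if m.values.contains 3 then acc.2 + 1 else acc.2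
       (twos, threes))
      = (let st2 := (PySem.List.sorted word.toList (fun x => x) false).foldl
           (fun (st : PySem.Set Int × Int × Option Char) c =>
             if some c == st.2.2 then (st.1, st.2.1 + 1, st.2.2)
             else ((if st.2.1 ≠ 0 then PySem.Set.add st.1 st.2.1 else st.1), 1, some c))
           (PySem.Set.empty, 0, none)
         let lens := if st2.2.1 ≠ 0 then PySem.Set.add st2.1 st2.2.1 else st2.1
         let twos := if lens.contains 2 then acc.1 + 1 else acc.1
         let threes := if lens.contains 3 then acc.2 + 1 else acc.2
         (twos, threes)) := by
    intro acc word _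
    have h2 := pvPerWord 2 word
    have h3 := pvPerWord 3 word
    rw [pvRunStep_eq] at h2 h3
    simp only [pvFinish] at h2 h3
    simp only [PySem.Set.contains] at h2 h3
    simp only [h2, h3]
    rfl
  have h := PySem.List.foldl_congr_mem data _ _ (((0 : Int), (0 : Int))) hstep
  unfold part1 part1_alt
  simp only [h]
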